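-- pv_equiv track=rewrite | github.com/ravitejajaligama/cph-leetcode | webscrap.py | return_clean
-- ===== SOURCE A (Python) =====
-- def return_clean(input):
--     input += ','
--     clean_input = []
--     i = 0
--     while(i < len(input)):
--         ch = input[i]
--         if(ch != '='):
--             # Proceed
--             i += 1
--         else:
--             # Skip space
--             i += 2
--
--             str11 = ""
--             if(input[i] == '['): # Array is present
--                 i += 1
--                 while(input[i] != ']'):
--                     str11 += input[i]
--                     i += 1
--                 str11 = str11.split(',')
--                 array_length = len(str11)
--                 str12 = [str(array_length)]
--                 str12.extend(str11)
--                 clean_input.append(" ".join(map(str, str12)))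
--             else:
--                 while(input[i]!=','):
--                     str11 += input[i]
--                     i += 1
--                 clean_input.append(str11)
--             i += 1
--     clean_input = " ".join(map(str, clean_input))
--     return clean_input
-- ===== SOURCE B (Python) =====
-- def return_clean(input):
--     rest = input + ','
--     out = []
--     while True:
--         _, sep, rest = rest.partition('=')
--         if not sep:
--             break
--         rest = rest[1:]                      # skip one char after '='
--         if rest[:1] == '[':
--             body, sep2, rest = rest[1:].partition(']')
--             if not sep2:
--                 break                        # unclosed '[': no more well-formed data
--             parts = body.split(',')
--             out.append(' '.join([str(len(parts))] + parts))
--         else: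
--             val, sep2, rest = rest.partition(',')
--             if not sep2:
--                 break                        # no terminator: no more well-formed data
--             out.append(val)
--     return ' '.join(out)
-- ===== Notes on version B (the rewrite author's own statement) =====
-- stated objective: simpler
-- what changed: A walks the string with a manual index, character-comparison loops and hand-built accumulator strings; B repeatedly splits the remaining suffix with str.partition on '=', ']' and ',', so all inner character loops disappear.
import Mathlib
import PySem

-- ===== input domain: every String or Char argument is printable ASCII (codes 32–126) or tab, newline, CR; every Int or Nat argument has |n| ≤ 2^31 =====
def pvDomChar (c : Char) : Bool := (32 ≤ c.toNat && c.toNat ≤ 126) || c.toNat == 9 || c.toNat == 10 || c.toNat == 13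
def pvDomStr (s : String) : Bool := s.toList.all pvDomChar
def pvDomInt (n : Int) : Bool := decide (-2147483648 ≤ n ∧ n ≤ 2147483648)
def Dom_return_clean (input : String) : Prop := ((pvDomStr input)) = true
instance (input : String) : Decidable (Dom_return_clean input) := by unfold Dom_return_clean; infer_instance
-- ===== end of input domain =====

-- B replaces A's manual index walk with repeated `partition` splits on '=' / ']' / ','
-- (objective: simpler/idiomatic; same return value wherever A returns).

-- ===== PORT A =====
-- tiny arithmetic/length facts cited by the termination proofs below (kept as named
-- lemmas so the recursive definitions stay small)
theorem rcSubLt (a i k : Nat) (hia : i < a) (hk : i ≤ k) : a - (k + 1) < a - i :=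
  Nat.sub_lt_sub_left hia (Nat.lt_succ_of_le hk)

theorem rcDropConsLt (r1 r3 : List Char) (c : Char) (h : r1.drop 1 = c :: r3) :
    r3.length < r1.length :=
  Nat.lt_of_lt_of_le (h ▸ Nat.lt_succ_self r3.length)
    (List.length_drop (l := r1) (i := 1) ▸ Nat.sub_le r1.length 1)

theorem rcDropLe (r1 r2 : List Char) (h : r1.drop 1 = r2) : r2.length ≤ r1.length :=
  h ▸ (List.length_drop (l := r1) (i := 1) ▸ Nat.sub_le r1.length 1)

-- A's inner `while input[i] != stop: str11 += input[i]; i += 1`, reading the characters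
-- from position i as the suffix `rem` (= cs.drop i) and keeping the running index i;
-- `none` = the Python IndexError (running off the end), excluded by Pre_return_clean.
def rcCollect (stop : Char) : List Char → Nat → List Char → Option (List Char × Nat)
  | [], _, _ => none
  | c :: rem, i, acc => if c = stop then some (acc, i) else rcCollect stop rem (i + 1) (acc ++ [c])

-- needed by rcALoop's termination proof
theorem rcCollect_le (stop : Char) :
    ∀ rem (i : Nat) acc v k, rcCollect stop rem i acc = some (v, k) → i ≤ k := by
  intro rem
  induction rem with
  | nil => intro i acc v k h; exact nomatch h
  | cons c rem ih =>
      intro i acc v k h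
      by_cases hc : c = stop
      · rw [rcCollect, if_pos hc] at h
        cases h
        exact Nat.le_refl i
      · rw [rcCollect, if_neg hc] at h
        exact Nat.le_trans (Nat.le_succ i) (ih (i + 1) (acc ++ [c]) v k h)

-- A's outer while, index i over cs = (input + ',').toList; `clean` is clean_input.
-- Where Python raises IndexError (excluded by Pre_return_clean) the port stops and
-- returns the entries collected so far.
def rcALoop (cs : List Char) (i : Nat) (clean : List (List Char)) : List (List Char) :=
  if h : i < cs.length then
    if cs[i] ≠ '=' then rcALoop cs (i + 1) clean
    else
      -- i += 2 (skip space), then input[i]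
      if h2 : i + 2 < cs.length then
        if cs[i + 2] = '[' then
          match hm : rcCollect ']' (cs.drop (i + 3)) (i + 3) [] with
          | some (str11, k) =>
              let parts := PySem.Chars.splitOn str11 [',']
              rcALoop cs (k + 1)
                (clean ++ [PySem.Chars.join [' '] (PySem.Int.toChars parts.length :: parts)])
          | none => clean
        else
          match hm : rcCollect ',' (cs.drop (i + 2)) (i + 2) [] with
          | some (str11, k) => rcALoop cs (k + 1) (clean ++ [str11])
          | none => clean
      else clean
  else clean
termination_by cs.length - i
decreasing_by
  · exact Nat.sub_succ_lt_self cs.length i h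
  · exact rcSubLt cs.length i k h
      (Nat.le_trans (Nat.le_add_right i 3) (rcCollect_le ']' (cs.drop (i + 3)) (i + 3) [] str11 k hm))
  · exact rcSubLt cs.length i k h
      (Nat.le_trans (Nat.le_add_right i 2) (rcCollect_le ',' (cs.drop (i + 2)) (i + 2) [] str11 k hm))

def return_clean (input : String) : String :=
  -- input += ','  … then  " ".join(clean_input)
  String.mk (PySem.Chars.join [' '] (rcALoop (input.toList ++ [',']) 0 []))

-- ===== PORT B =====
-- hand port of Python's s.partition(c) for a one-char separator, exact: split at the FIRST
-- occurrence of c; `none` = separator absent (Python returns (s, '', '')).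
def rcPartition (c : Char) (l : List Char) : Option (List Char × List Char) :=
  match l.dropWhile (· != c) with
  | [] => none
  | _ :: t => some (l.takeWhile (· != c), t)

-- needed by rcBLoop's termination proof
theorem rcPartition_length_lt (c : Char) (l a t : List Char)
    (h : rcPartition c l = some (a, t)) : t.length < l.length := by
  unfold rcPartition at h
  cases hd : l.dropWhile (· != c) with
  | nil => rw [hd] at h; exact nomatch h
  | cons x r =>
      rw [hd] at h
      cases h
      have hle : (x :: t).length ≤ l.length := hd ▸ List.length_dropWhile_le (· != c) l
      exact Nat.lt_of_lt_of_le (Nat.lt_succ_self t.length) hle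

-- B's while-True loop over the remaining suffix `rest`; `out` is B's out list.
def rcBLoop (rest : List Char) (out : List (List Char)) : List (List Char) :=
  match hp : rcPartition '=' rest with
  | none => out
  | some (_, r1) =>
    match hr : r1.drop 1 with                -- rest = rest[1:];  rest[:1] == '[' ?
    | '[' :: r3 =>
        match hb : rcPartition ']' r3 with
        | none => out
        | some (body, r4) =>
            let parts := PySem.Chars.splitOn body [',']
            rcBLoop r4 (out ++ [PySem.Chars.join [' '] (PySem.Int.toChars parts.length :: parts)])
    | r2 =>
        match hv : rcPartition ',' r2 with
        | none => out
        | some (val, r5) => rcBLoop r5 (out ++ [val])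
termination_by rest.length
decreasing_by
  · exact Nat.lt_trans
      (Nat.lt_trans (rcPartition_length_lt ']' r3 body r4 hb) (rcDropConsLt r1 r3 '[' hr))
      (rcPartition_length_lt '=' rest _ r1 hp)
  · exact Nat.lt_of_lt_of_le (rcPartition_length_lt ',' r2 val r5 hv) (rcDropLe r1 r2 hr)
      |>.trans (rcPartition_length_lt '=' rest _ r1 hp)

def return_clean_alt (input : String) : String :=
  String.mk (PySem.Chars.join [' '] (rcBLoop (input.toList ++ [',']) []))

-- ===== PRECONDITION & SPEC =====
-- 5-state scanner over the characters of input + ',' (0 = top level, 1 = the skipped char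
-- after '=', 2 = first value char, 3 = inside '[…]', 4 = inside a scalar value); Pre_ holds
-- iff the scan ends at top level, i.e. iff the string lies in the regular language
-- ( [^=]* '=' . ( '[' [^\]]* ']' | [^,]* ',' ) )* [^=]* .
def rcOkGo (st : Nat) : List Char → Bool
  | [] => st == 0
  | c :: r =>
      if st = 0 then rcOkGo (if c = '=' then 1 else 0) r
      else if st = 1 then rcOkGo 2 r
      else if st = 2 then rcOkGo (if c = '[' then 3 else if c = ',' then 0 else 4) r
      else if st = 3 then rcOkGo (if c = ']' then 0 else 3) r
      else rcOkGo (if c = ',' then 0 else 4) r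

-- Pre_ excludes exactly the inputs on which A raises IndexError: a processed '=' with fewer
-- than two characters after it, or an opened '[' never closed by ']'.
def Pre_return_clean (input : String) : Prop := rcOkGo 0 (input.toList ++ [',']) = true
instance (input : String) : Decidable (Pre_return_clean input) := by
  unfold Pre_return_clean; infer_instance

def pvWitness_return_clean : String := "key1=\u0020value1,key2=\u0020[3,5,7],k= x"

def Spec_return_clean (input : String) (out : String) : Prop := out = return_clean_alt input
instance (input : String) (out : String) : Decidable (Spec_return_clean input out) := by
  unfold Spec_return_clean; infer_instance

-- ===== CLAIM (what is proved, stated in full; the proofs are below) =====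
def Claim_equal_return_clean : Prop := ∀ (input : String), Dom_return_clean input → Pre_return_clean input → Spec_return_clean input (return_clean input)

-- ===== LEMMAS AND PROOFS =====

theorem rcPartition_eq_some (c : Char) : ∀ (l a t : List Char), rcPartition c l = some (a, t) →
    l = a ++ c :: t := by
  intro l
  induction l with
  | nil => intro a t h; simp [rcPartition] at h
  | cons x xs ih =>
      intro a t h
      by_cases hx : x = c
      · subst hx
        simp [rcPartition, List.dropWhile_cons, List.takeWhile_cons] at h
        obtain ⟨ha, ht⟩ := h
        subst ha; subst ht; rfl
      · have hb : (x != c) = true := by simp [hx]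
        simp only [rcPartition, List.dropWhile_cons, List.takeWhile_cons, hb, if_true] at h
        cases hd : xs.dropWhile (· != c) with
        | nil => rw [hd] at h; cases h
        | cons y r =>
            rw [hd] at h
            cases h
            have := ih (xs.takeWhile (· != c)) t (by simp only [rcPartition]; rw [hd])
            rw [List.cons_append]
            exact congrArg (x :: ·) this
theorem rcPartition_cons_self (c : Char) (l : List Char) :
    rcPartition c (c :: l) = some ([], l) := by
  simp [rcPartition, List.dropWhile_cons, List.takeWhile_cons]

theorem rcPartition_cons_ne (c x : Char) (l : List Char) (hx : x ≠ c) :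
    rcPartition c (x :: l) = (rcPartition c l).map (fun p => (x :: p.1, p.2)) := by
  have hb : (x != c) = true := by simp [hx]
  simp only [rcPartition, List.dropWhile_cons, List.takeWhile_cons, hb, if_true]
  cases l.dropWhile (· != c) <;> simp

theorem drop_length_succ_append (a t : List Char) (c : Char) :
    (a ++ c :: t).drop (a.length + 1) = t := by
  induction a with
  | nil => simp
  | cons x xs ih => simpa using ih

theorem rcPartition_drop (cs : List Char) (stop : Char) (s : Nat) (a t : List Char)
    (h : rcPartition stop (cs.drop s) = some (a, t)) : t = cs.drop (s + a.length + 1) := by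
  have he := rcPartition_eq_some stop (cs.drop s) a t h
  have h2 : cs.drop (s + a.length + 1) = ((cs.drop s).drop (a.length + 1)) := by
    rw [List.drop_drop]; ring_nf
  rw [h2, he, drop_length_succ_append]

theorem rcCollect_eq (stop : Char) :
    ∀ rem (i : Nat) acc, rcCollect stop rem i acc
      = (rcPartition stop rem).map (fun p => (acc ++ p.1, i + p.1.length)) := by
  intro rem
  induction rem with
  | nil => intro i acc; simp [rcCollect, rcPartition]
  | cons c rem ih =>
      intro i acc
      by_cases hc : c = stop
      · subst hc
        rw [rcCollect, if_pos rfl, rcPartition_cons_self]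
        simp
      · rw [rcCollect, if_neg hc, ih (i + 1) (acc ++ [c]), rcPartition_cons_ne stop c rem hc]
        cases hP : rcPartition stop rem with
        | none => simp
        | some p => simp; omega

theorem rcBLoop_of_none (rest : List Char) (out : List (List Char))
    (h : rcPartition '=' rest = none) : rcBLoop rest out = out := by
  rw [rcBLoop.eq_def]
  split
  · rfl
  · next hp => rw [h] at hp; cases hp

theorem rcBLoop_cons_ne (x : Char) (l : List Char) (out : List (List Char)) (hx : x ≠ '=') :
    rcBLoop (x :: l) out = rcBLoop l out := by
  rw [rcBLoop.eq_def, rcBLoop.eq_def (rest := l), rcPartition_cons_ne '=' x l hx]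
  cases hP : rcPartition '=' l with
  | none => rfl
  | some p => cases p; rfl

theorem rcBLoop_eq_nil (r1 : List Char) (out : List (List Char)) (h2 : r1.drop 1 = []) :
    rcBLoop ('=' :: r1) out = out := by
  rw [rcBLoop.eq_def]
  split
  · next heq => simp [rcPartition_cons_self] at heq
  · next fst r1' heq =>
      rw [rcPartition_cons_self] at heq
      injection heq with heq; injection heq with e1 e2
      subst e1; subst e2
      split
      · next r3' heq2 => rw [h2] at heq2; cases heq2
      · next heq2 =>
          split
          · rfl
          · next heq3 => rw [h2] at heq3; simp [rcPartition] at heq3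

theorem rcBLoop_eq_br_none (r1 r3 : List Char) (out : List (List Char))
    (h2 : r1.drop 1 = '[' :: r3) (hb : rcPartition ']' r3 = none) :
    rcBLoop ('=' :: r1) out = out := by
  rw [rcBLoop.eq_def]
  split
  · next heq => simp [rcPartition_cons_self] at heq
  · next fst r1' heq =>
      rw [rcPartition_cons_self] at heq
      injection heq with heq; injection heq with e1 e2
      subst e1; subst e2
      split
      · next r3' heq2 =>
          rw [h2] at heq2; injection heq2 with e3 e4
          subst e4
          split
          · rfl
          · next heq3 => rw [hb] at heq3; cases heq3
      · next heq2 => exact (heq2 r3 h2).elim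

theorem rcBLoop_eq_br_some (r1 r3 body r4 : List Char) (out : List (List Char))
    (h2 : r1.drop 1 = '[' :: r3) (hb : rcPartition ']' r3 = some (body, r4)) :
    rcBLoop ('=' :: r1) out
      = rcBLoop r4 (out ++ [PySem.Chars.join [' ']
          (PySem.Int.toChars (PySem.Chars.splitOn body [',']).length
            :: PySem.Chars.splitOn body [','])]) := by
  rw [rcBLoop.eq_def]
  split
  · next heq => simp [rcPartition_cons_self] at heq
  · next fst r1' heq =>
      rw [rcPartition_cons_self] at heq
      injection heq with heq; injection heq with e1 e2
      subst e1; subst e2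
      split
      · next r3' heq2 =>
          rw [h2] at heq2; injection heq2 with e3 e4
          subst e4
          split
          · next heq3 => rw [hb] at heq3; cases heq3
          · next body' r4' heq3 =>
              rw [hb] at heq3; injection heq3 with heq3; injection heq3 with e5 e6
              subst e5; subst e6; rfl
      · next heq2 => exact (heq2 r3 h2).elim

theorem rcBLoop_eq_sc_none (r1 r2 : List Char) (c : Char) (out : List (List Char))
    (h2 : r1.drop 1 = c :: r2) (hc : c ≠ '[') (hv : rcPartition ',' (c :: r2) = none) :
    rcBLoop ('=' :: r1) out = out := by
  rw [rcBLoop.eq_def]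
  split
  · next heq => simp [rcPartition_cons_self] at heq
  · next fst r1' heq =>
      rw [rcPartition_cons_self] at heq
      injection heq with heq; injection heq with e1 e2
      subst e1; subst e2
      split
      · next r3' heq2 =>
          rw [h2] at heq2; injection heq2 with e3 e4
          exact (hc e3).elim
      · next heq2 =>
          rw [h2]
          split
          · rfl
          · next heq3 => rw [hv] at heq3; cases heq3

theorem rcBLoop_eq_sc_some (r1 r2 val r5 : List Char) (c : Char) (out : List (List Char))
    (h2 : r1.drop 1 = c :: r2) (hc : c ≠ '[') (hv : rcPartition ',' (c :: r2) = some (val, r5)) :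
    rcBLoop ('=' :: r1) out = rcBLoop r5 (out ++ [val]) := by
  rw [rcBLoop.eq_def]
  split
  · next heq => simp [rcPartition_cons_self] at heq
  · next fst r1' heq =>
      rw [rcPartition_cons_self] at heq
      injection heq with heq; injection heq with e1 e2
      subst e1; subst e2
      split
      · next r3' heq2 =>
          rw [h2] at heq2; injection heq2 with e3 e4
          exact (hc e3).elim
      · next heq2 =>
          rw [h2]
          split
          · next heq3 => rw [hv] at heq3; cases heq3
          · next val' r5' heq3 =>
              rw [hv] at heq3; injection heq3 with heq3; injection heq3 with e5 e6
              subst e5; subst e6; rfl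

theorem loop_eq (cs : List Char) :
    ∀ n i out, cs.length - i ≤ n → rcALoop cs i out = rcBLoop (cs.drop i) out := by
  intro n
  induction n with
  | zero =>
      intro i out hn
      rw [rcALoop, dif_neg (by omega), List.drop_eq_nil_of_le (by omega),
          rcBLoop_of_none _ _ (by simp [rcPartition])]
  | succ n ih =>
      intro i out hn
      by_cases hi : i < cs.length
      · by_cases hc : cs[i] = '='
        · rw [rcALoop, dif_pos hi, if_neg (not_not_intro hc),
              List.drop_eq_getElem_cons hi, hc]
          have hr1 : (cs.drop (i + 1)).drop 1 = cs.drop (i + 2) := by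
            rw [List.drop_drop]
          by_cases h2 : i + 2 < cs.length
          · rw [dif_pos h2]
            have hd2 : cs.drop (i + 2) = cs[i + 2] :: cs.drop (i + 3) :=
              List.drop_eq_getElem_cons h2
            by_cases hbr : cs[i + 2] = '['
            · rw [if_pos hbr]
              have hcol := rcCollect_eq ']' (cs.drop (i + 3)) (i + 3) []
              cases hP : rcPartition ']' (cs.drop (i + 3)) with
              | none =>
                  rw [hP] at hcol; simp only [Option.map_none] at hcol
                  rw [rcBLoop_eq_br_none (cs.drop (i + 1)) (cs.drop (i + 3)) out
                        (by rw [hr1, hd2, hbr]) hP]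
                  split
                  · next str11 k hm => rw [hcol] at hm; cases hm
                  · rfl
              | some p =>
                  obtain ⟨a, t⟩ := p
                  rw [hP] at hcol; simp only [Option.map_some, List.nil_append] at hcol
                  have ht := rcPartition_drop cs ']' (i + 3) a t hP
                  rw [rcBLoop_eq_br_some (cs.drop (i + 1)) (cs.drop (i + 3)) a t out
                        (by rw [hr1, hd2, hbr]) hP]
                  split
                  · next str11 k hm =>
                      rw [hcol] at hm
                      injection hm with hm; injection hm with e1 e2
                      subst e1; subst e2
                      rw [ht]
                      exact ih (i + 3 + a.length + 1) _ (by omega)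
                  · next hm => rw [hcol] at hm; cases hm
            · rw [if_neg hbr]
              have hcol := rcCollect_eq ',' (cs.drop (i + 2)) (i + 2) []
              cases hP : rcPartition ',' (cs.drop (i + 2)) with
              | none =>
                  rw [hP] at hcol; simp only [Option.map_none] at hcol
                  rw [rcBLoop_eq_sc_none (cs.drop (i + 1)) (cs.drop (i + 3)) cs[i + 2] out
                        (by rw [hr1, hd2]) hbr (by rw [← hd2]; exact hP)]
                  split
                  · next str11 k hm => rw [hcol] at hm; cases hm
                  · rfl
              | some p =>
                  obtain ⟨a, t⟩ := p
                  rw [hP] at hcol; simp only [Option.map_some, List.nil_append] at hcol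
                  have ht := rcPartition_drop cs ',' (i + 2) a t hP
                  rw [rcBLoop_eq_sc_some (cs.drop (i + 1)) (cs.drop (i + 3)) a t cs[i + 2] out
                        (by rw [hr1, hd2]) hbr (by rw [← hd2]; exact hP)]
                  split
                  · next str11 k hm =>
                      rw [hcol] at hm
                      injection hm with hm; injection hm with e1 e2
                      subst e1; subst e2
                      rw [ht]
                      exact ih (i + 2 + a.length + 1) _ (by omega)
                  · next hm => rw [hcol] at hm; cases hm
          · rw [dif_neg h2,
                rcBLoop_eq_nil (cs.drop (i + 1)) out
                  (by rw [hr1]; exact List.drop_eq_nil_of_le (by omega))]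
        · rw [rcALoop, dif_pos hi, if_pos hc, List.drop_eq_getElem_cons hi,
              rcBLoop_cons_ne cs[i] (cs.drop (i + 1)) out hc]
          exact ih (i + 1) out (by omega)
      · rw [rcALoop, dif_neg hi, List.drop_eq_nil_of_le (by omega),
            rcBLoop_of_none _ _ (by simp [rcPartition])]

theorem return_clean_spec : Claim_equal_return_clean := by
  intro input _ _
  unfold Spec_return_clean return_clean return_clean_alt
  have := loop_eq (input.toList ++ [',']) (input.toList ++ [',']).length 0 [] (by omega)
  simp only [List.drop_zero] at this
  rw [this]
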